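-- pv_equiv track=rewrite | github.com/gzhou2142/python_code | cs61a/projects/hog/hog_test.py | is_swap
-- ===== SOURCE A (Python) =====
-- def is_swap(score0, score1):
--     """Returns whether the last two digits of SCORE0 and SCORE1 are reversed
--     versions of each other, such as 19 and 91.
--     """
--     # BEGIN Question 4
--     if score0 < 10 and score1 < 10:
--         x1 = 0
--         y1 = score0
--         x2 = 0
--         y2 = score1
--     elif score0 >= 10 and score1 >=10:
--         x1 = [int(n) for n in str(score0)][-2::][0]
--         y1 = [int(n) for n in str(score0)][-2::][1]
--         x2 = [int(n) for n in str(score1)][-2::][0]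
--         y2 = [int(n) for n in str(score1)][-2::][1]
--     elif score0 < 10:
--         x1 = 0
--         y1 = score0
--         x2 = [int(n) for n in str(score1)][-2::][0]
--         y2 = [int(n) for n in str(score1)][-2::][1]
--     elif score1 < 10:
--         x1 = [int(n) for n in str(score0)][-2::][0]
--         y1 = [int(n) for n in str(score0)][-2::][1]
--         x2 = 0
--         y2 = score1
--
--     set1 = set([int(n) for n in str(score0)][-2::])
--     set2 = set([int(n) for n in str(score1)][-2::])
--
--     if x1==y2 and y1==x2:
--         return True
--     else:
--         return False
-- ===== SOURCE B (Python) =====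
-- def is_swap(score0, score1):
--     """Returns whether the last two digits of SCORE0 and SCORE1 are reversed
--     versions of each other, such as 19 and 91.
--     """
--     return score0 // 10 % 10 == score1 % 10 and score0 % 10 == score1 // 10 % 10
-- ===== Notes on version B (the rewrite author's own statement) =====
-- stated objective: simpler
-- what changed: Replaces the four-way branch over string/list digit extraction with a one-line integer-arithmetic comparison of tens and ones digits (score//10%10 and score%10), which handles single-digit scores uniformly.
import Mathlib
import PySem

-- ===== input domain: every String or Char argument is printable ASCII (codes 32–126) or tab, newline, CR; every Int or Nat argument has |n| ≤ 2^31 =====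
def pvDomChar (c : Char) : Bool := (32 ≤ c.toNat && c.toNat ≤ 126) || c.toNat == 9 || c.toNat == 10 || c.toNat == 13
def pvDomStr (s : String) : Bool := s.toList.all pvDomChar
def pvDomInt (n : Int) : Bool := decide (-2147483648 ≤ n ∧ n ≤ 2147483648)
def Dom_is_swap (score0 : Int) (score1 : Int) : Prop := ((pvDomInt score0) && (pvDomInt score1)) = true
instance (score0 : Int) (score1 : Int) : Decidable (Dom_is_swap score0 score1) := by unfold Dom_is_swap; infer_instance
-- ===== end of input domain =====

-- B replaces A's string/list digit extraction and four-way branch with a one-line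
-- tens/ones integer-arithmetic comparison (simpler; equal on all nonnegative scores).


-- ===== PORT A =====
-- int(n) for a one-character string n; the default 0 is only reached where Python's
-- int() raises ValueError (the '-' of a negative score), excluded by Pre_is_swap.
def pvAIntOfCharD (c : Char) : Int := (PySem.Int.ofChars? [c]).getD 0

-- [int(n) for n in str(score)]
def pvADigits (score : Int) : List Int := (PySem.Int.toChars score).map pvAIntOfCharD

-- [int(n) for n in str(score)][-2::]
def pvALastTwo (score : Int) : List Int := PySem.List.slice (pvADigits score) (some (-2)) none

def is_swap (score0 : Int) (score1 : Int) : Bool :=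
  let q : Int × Int × Int × Int :=
    if score0 < 10 ∧ score1 < 10 then
      (0, score0, 0, score1)
    else if 10 ≤ score0 ∧ 10 ≤ score1 then
      (PySem.List.pyGetD (pvALastTwo score0) 0 0,
       PySem.List.pyGetD (pvALastTwo score0) 1 0,
       PySem.List.pyGetD (pvALastTwo score1) 0 0,
       PySem.List.pyGetD (pvALastTwo score1) 1 0)
    else if score0 < 10 then
      (0, score0,
       PySem.List.pyGetD (pvALastTwo score1) 0 0,
       PySem.List.pyGetD (pvALastTwo score1) 1 0)
    else -- score1 < 10 (exhaustive with the branches above)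
      (PySem.List.pyGetD (pvALastTwo score0) 0 0,
       PySem.List.pyGetD (pvALastTwo score0) 1 0,
       0, score1)
  let _set1 := PySem.Set.ofList (pvALastTwo score0)
  let _set2 := PySem.Set.ofList (pvALastTwo score1)
  if q.1 = q.2.2.2 ∧ q.2.1 = q.2.2.1 then true else false

-- ===== PORT B =====
def is_swap_alt (score0 : Int) (score1 : Int) : Bool :=
  decide (PySem.Int.mod (PySem.Int.floordiv score0 10) 10 = PySem.Int.mod score1 10) &&
  decide (PySem.Int.mod score0 10 = PySem.Int.mod (PySem.Int.floordiv score1 10) 10)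

-- ===== PRECONDITION & SPEC =====
-- Pre_ excludes exactly the inputs with a negative score, on which A raises
-- ValueError (int('-') while building set1/set2 from str(score)).
def Pre_is_swap (score0 : Int) (score1 : Int) : Prop := 0 ≤ score0 ∧ 0 ≤ score1
instance (score0 : Int) (score1 : Int) : Decidable (Pre_is_swap score0 score1) := by unfold Pre_is_swap; infer_instance
def pvWitness_is_swap : Int × Int := (19, 91)

def Spec_is_swap (score0 : Int) (score1 : Int) (out : Bool) : Prop := out = is_swap_alt score0 score1
instance (score0 : Int) (score1 : Int) (out : Bool) : Decidable (Spec_is_swap score0 score1 out) := by unfold Spec_is_swap; infer_instance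

-- ===== CLAIM (what is proved, stated in full; the proofs are below) =====
def Claim_equal_is_swap : Prop := ∀ (score0 : Int) (score1 : Int), Dom_is_swap score0 score1 → Pre_is_swap score0 score1 → Spec_is_swap score0 score1 (is_swap score0 score1)

-- ===== LEMMAS AND PROOFS =====

-- Nat.toDigitsCore's accumulator is an append (no Mathlib lemma states this).
lemma pvToDigitsCore_acc (f : Nat) : ∀ (n : Nat) (ds : List Char),
    Nat.toDigitsCore 10 f n ds = Nat.toDigitsCore 10 f n [] ++ ds := by
  induction f with
  | zero => intro n ds; simp [Nat.toDigitsCore]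
  | succ f ih =>
    intro n ds
    simp only [Nat.toDigitsCore]
    by_cases h : n / 10 = 0
    · simp [h]
    · simp only [h, if_false]
      rw [ih (n / 10) (Nat.digitChar (n % 10) :: ds), ih (n / 10) [Nat.digitChar (n % 10)]]
      simp

-- With positive fuel, toDigitsCore ends in the ones-digit character.
lemma pvToDigitsCore_last (f n : Nat) (hf : 0 < f) : ∃ pre,
    Nat.toDigitsCore 10 f n [] = pre ++ [Nat.digitChar (n % 10)] := by
  obtain ⟨g, rfl⟩ : ∃ g, f = g + 1 := ⟨f - 1, by omega⟩
  simp only [Nat.toDigitsCore]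
  by_cases h : n / 10 = 0
  · exact ⟨[], by simp [h]⟩
  · exact ⟨Nat.toDigitsCore 10 g (n / 10) [], by
      simp only [h, if_false]; rw [pvToDigitsCore_acc]⟩

-- For m ≥ 10 the decimal string of m ends in its tens and ones digit characters.
lemma pvToDigits_large (m : Nat) (h : 10 ≤ m) : ∃ pre,
    Nat.toDigits 10 m = pre ++ [Nat.digitChar (m / 10 % 10), Nat.digitChar (m % 10)] := by
  have hm0 : m / 10 ≠ 0 := by omega
  obtain ⟨pre, hpre⟩ := pvToDigitsCore_last m (m / 10) (by omega)
  refine ⟨pre, ?_⟩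
  unfold Nat.toDigits
  simp only [Nat.toDigitsCore, hm0, if_false]
  rw [pvToDigitsCore_acc, hpre]
  simp

-- int(c) of a decimal digit character.
lemma pvIntOfDigitChar (d : Nat) (h : d < 10) : pvAIntOfCharD (Nat.digitChar d) = (d : Int) := by
  interval_cases d <;> decide

-- A's [-2::] extraction, evaluated arithmetically, for a two-or-more-digit score.
lemma pvLastTwo_large (m : Nat) (h : 10 ≤ m) :
    PySem.List.pyGetD (pvALastTwo (m : Int)) 0 0 = ((m / 10 % 10 : Nat) : Int) ∧
    PySem.List.pyGetD (pvALastTwo (m : Int)) 1 0 = ((m % 10 : Nat) : Int) := by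
  obtain ⟨pre, hpre⟩ := pvToDigits_large m h
  have hdig : pvADigits (m : Int) =
      pre.map pvAIntOfCharD ++ [((m / 10 % 10 : Nat) : Int), ((m % 10 : Nat) : Int)] := by
    unfold pvADigits
    have ht : PySem.Int.toChars (m : Int) = Nat.toDigits 10 m := by
      simp [PySem.Int.toChars]
    rw [ht, hpre]
    simp [pvIntOfDigitChar _ (Nat.mod_lt _ (by omega))]
  have hslice : pvALastTwo (m : Int) = [((m / 10 % 10 : Nat) : Int), ((m % 10 : Nat) : Int)] := by
    unfold pvALastTwo
    rw [PySem.List.slice_from_neg_ofNat _ 2 (by omega), hdig]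
    simp
  rw [hslice]
  constructor <;> rfl

-- B's port on nonnegative scores, as a Boolean of Nat digit equations.
lemma pvAltChar (m0 m1 : Nat) : is_swap_alt (m0 : Int) (m1 : Int) =
    (decide (m0 / 10 % 10 = m1 % 10) && decide (m0 % 10 = m1 / 10 % 10)) := by
  unfold is_swap_alt
  rw [show ((10 : Int)) = ((10 : Nat) : Int) from rfl]
  rw [PySem.Int.floordiv_natCast, PySem.Int.floordiv_natCast,
    PySem.Int.mod_natCast, PySem.Int.mod_natCast, PySem.Int.mod_natCast, PySem.Int.mod_natCast]
  simp only [Nat.cast_inj]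

-- A's port on nonnegative scores computes the same Nat digit equations.
lemma pvAChar (m0 m1 : Nat) : is_swap (m0 : Int) (m1 : Int) =
    (decide (m0 / 10 % 10 = m1 % 10) && decide (m0 % 10 = m1 / 10 % 10)) := by
  unfold is_swap
  rw [← Bool.decide_and]
  by_cases hc0 : m0 < 10 <;> by_cases hc1 : m1 < 10
  · have e0 : m0 / 10 = 0 := Nat.div_eq_of_lt hc0
    have e1 : m1 / 10 = 0 := Nat.div_eq_of_lt hc1
    rw [if_pos (show (m0 : Int) < 10 ∧ (m1 : Int) < 10 by constructor <;> omega)]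
    dsimp only
    split_ifs with hp
    · symm; rw [decide_eq_true_eq]; rw [e0, e1]; omega
    · symm; rw [decide_eq_false_iff_not]
      intro hq
      rw [e0, e1] at hq
      rw [not_and_or] at hp
      rcases hp with hp | hp <;> omega
  · have e0 : m0 / 10 = 0 := Nat.div_eq_of_lt hc0
    obtain ⟨g0, g1⟩ := pvLastTwo_large m1 (by omega)
    rw [if_neg (show ¬((m0 : Int) < 10 ∧ (m1 : Int) < 10) by omega),
      if_neg (show ¬((10 : Int) ≤ (m0 : Int) ∧ (10 : Int) ≤ (m1 : Int)) by omega),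
      if_pos (show (m0 : Int) < 10 by omega)]
    dsimp only
    rw [g0, g1]
    split_ifs with hp
    · symm; rw [decide_eq_true_eq]; rw [e0]; omega
    · symm; rw [decide_eq_false_iff_not]
      intro hq
      rw [e0] at hq
      rw [not_and_or] at hp
      rcases hp with hp | hp <;> omega
  · have e1 : m1 / 10 = 0 := Nat.div_eq_of_lt hc1
    obtain ⟨g0, g1⟩ := pvLastTwo_large m0 (by omega)
    rw [if_neg (show ¬((m0 : Int) < 10 ∧ (m1 : Int) < 10) by omega),
      if_neg (show ¬((10 : Int) ≤ (m0 : Int) ∧ (10 : Int) ≤ (m1 : Int)) by omega),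
      if_neg (show ¬((m0 : Int) < 10) by omega)]
    dsimp only
    rw [g0, g1]
    split_ifs with hp
    · symm; rw [decide_eq_true_eq]; rw [e1]; omega
    · symm; rw [decide_eq_false_iff_not]
      intro hq
      rw [e1] at hq
      rw [not_and_or] at hp
      rcases hp with hp | hp <;> omega
  · obtain ⟨a0, a1⟩ := pvLastTwo_large m0 (by omega)
    obtain ⟨b0, b1⟩ := pvLastTwo_large m1 (by omega)
    rw [if_neg (show ¬((m0 : Int) < 10 ∧ (m1 : Int) < 10) by omega),
      if_pos (show (10 : Int) ≤ (m0 : Int) ∧ (10 : Int) ≤ (m1 : Int) by constructor <;> omega)]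
    dsimp only
    rw [a0, a1, b0, b1]
    split_ifs with hp
    · symm; rw [decide_eq_true_eq]; omega
    · symm; rw [decide_eq_false_iff_not]
      intro hq
      rw [not_and_or] at hp
      rcases hp with hp | hp <;> omega

-- ===== VERDICT (by name: the statement is the Claim_ definition above) =====
theorem is_swap_spec : Claim_equal_is_swap := by
  intro score0 score1 _ hpre
  obtain ⟨h0, h1⟩ := hpre
  obtain ⟨m0, rfl⟩ := Int.eq_ofNat_of_zero_le h0
  obtain ⟨m1, rfl⟩ := Int.eq_ofNat_of_zero_le h1
  unfold Spec_is_swap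
  rw [pvAChar, pvAltChar]
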